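-- pv_equiv track=rewrite | github.com/sugpa-team/su-gpa | backend/app/services/bannerweb_degree_eval_parser.py | _find_section_ranges
-- ===== SOURCE A (Python) =====
-- SECTION_NAMES = [
--     "UNIVERSITY COURSES",
--     "REQUIRED COURSES",
--     "CORE ELECTIVES",
--     "AREA ELECTIVES",
--     "FREE ELECTIVES",
--     "FACULTY COURSES",
--     "ENGINEERING",
--     "BASIC SCIENCE",
-- ]
--
-- def _find_section_ranges(lines: list[str]) -> list[tuple[str, int, int]]:
--     section_starts: list[tuple[str, int]] = []
--     for idx, line in enumerate(lines):
--         for section_name in SECTION_NAMES: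
--             if line == section_name:
--                 section_starts.append((section_name, idx))
--     ranges = []
--     for i, (name, start_idx) in enumerate(section_starts):
--         end_idx = section_starts[i + 1][1] if i + 1 < len(section_starts) else len(lines)
--         ranges.append((name, start_idx + 1, end_idx))
--     return ranges
-- ===== SOURCE B (Python) =====
-- SECTION_NAMES = [
--     "UNIVERSITY COURSES",
--     "REQUIRED COURSES",
--     "CORE ELECTIVES",
--     "AREA ELECTIVES",
--     "FREE ELECTIVES",
--     "FACULTY COURSES",
--     "ENGINEERING",
--     "BASIC SCIENCE",
-- ]
--
-- _SECTION_SET = frozenset(SECTION_NAMES)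
--
-- def _find_section_ranges(lines: list[str]) -> list[tuple[str, int, int]]:
--     ranges: list[tuple[str, int, int]] = []
--     pending = None  # (name, start_idx) of the section whose end we have not seen yet
--     for idx, line in enumerate(lines):
--         if line in _SECTION_SET:
--             if pending is not None:
--                 ranges.append((pending[0], pending[1] + 1, idx))
--             pending = (line, idx)
--     if pending is not None:
--         ranges.append((pending[0], pending[1] + 1, len(lines)))
--     return ranges
-- ===== Notes on version B (the rewrite author's own statement) =====
-- stated objective: simpler
-- what changed: Replaced the two-pass build-a-starts-list-then-pair-neighbours structure with a single streaming pass that keeps one pending section as state and emits each range when the next header (or end of input) is seen.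
import Mathlib
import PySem

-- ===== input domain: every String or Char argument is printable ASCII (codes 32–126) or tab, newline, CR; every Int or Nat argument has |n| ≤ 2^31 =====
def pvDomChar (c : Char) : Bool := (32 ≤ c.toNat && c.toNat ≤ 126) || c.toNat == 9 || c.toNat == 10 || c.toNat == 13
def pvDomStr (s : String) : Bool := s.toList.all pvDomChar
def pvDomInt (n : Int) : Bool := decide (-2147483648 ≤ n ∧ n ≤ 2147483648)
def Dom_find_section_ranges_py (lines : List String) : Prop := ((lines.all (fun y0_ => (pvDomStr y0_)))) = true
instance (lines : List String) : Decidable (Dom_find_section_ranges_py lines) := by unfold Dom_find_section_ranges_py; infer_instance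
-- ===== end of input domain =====

-- B replaces A's two passes (collect all section starts, then pair neighbours) with one
-- streaming pass that keeps a single pending section as state (objective: simpler).

-- ===== PORT A =====
def SECTION_NAMES : List String :=
  ["UNIVERSITY COURSES", "REQUIRED COURSES", "CORE ELECTIVES", "AREA ELECTIVES",
   "FREE ELECTIVES", "FACULTY COURSES", "ENGINEERING", "BASIC SCIENCE"]

-- A's second loop: each start is paired with the NEXT start (or len(lines) for the last one).
def aBuildRanges (n : Int) : List (String × Int) → List (String × Int × Int)
  | [] => []
  | (name, start_idx) :: rest =>
    let end_idx : Int := match rest with | [] => n | (_, s2) :: _ => s2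
    (name, start_idx + 1, end_idx) :: aBuildRanges n rest

def find_section_ranges_py (lines : List String) : List (String × Int × Int) :=
  let section_starts : List (String × Int) :=
    (PySem.List.enumerate lines).foldl (fun acc p =>
      SECTION_NAMES.foldl (fun acc2 section_name =>
        if p.2 == section_name then acc2 ++ [(section_name, p.1)] else acc2) acc) []
  aBuildRanges (lines.length : Int) section_starts

-- ===== PORT B =====
def bStep (st : List (String × Int × Int) × Option (String × Int)) (p : Int × String) :
    List (String × Int × Int) × Option (String × Int) :=
  if SECTION_NAMES.contains p.2 then
    (match st.2 with
     | some pend => st.1 ++ [(pend.1, pend.2 + 1, p.1)]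
     | none => st.1,
     some (p.2, p.1))
  else st

def bFlush (n : Int) (st : List (String × Int × Int) × Option (String × Int)) :
    List (String × Int × Int) :=
  match st.2 with
  | some pend => st.1 ++ [(pend.1, pend.2 + 1, n)]
  | none => st.1

def find_section_ranges_py_alt (lines : List String) : List (String × Int × Int) :=
  bFlush (lines.length : Int) ((PySem.List.enumerate lines).foldl bStep ([], none))

-- ===== PRECONDITION & SPEC =====
def Spec_find_section_ranges_py (lines : List String) (out : List (String × Int × Int)) : Prop := out = find_section_ranges_py_alt lines
instance (lines : List String) (out : List (String × Int × Int)) : Decidable (Spec_find_section_ranges_py lines out) := by unfold Spec_find_section_ranges_py; infer_instance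

-- ===== CLAIM (what is proved, stated in full; the proofs are below) =====
def Claim_equal_find_section_ranges_py : Prop := ∀ (lines : List String), Dom_find_section_ranges_py lines → Spec_find_section_ranges_py lines (find_section_ranges_py lines)

-- ===== LEMMAS AND PROOFS =====

-- the list of section starts both programs implicitly compute
def specStarts : List String → Int → List (String × Int)
  | [], _ => []
  | l :: ls, i =>
    if SECTION_NAMES.contains l then (l, i) :: specStarts ls (i + 1) else specStarts ls (i + 1)

theorem foldl_names_not_mem (l : String) (i : Int) (acc : List (String × Int))
    (ns : List String) (h : l ∉ ns) :
    ns.foldl (fun acc2 nm => if l == nm then acc2 ++ [(nm, i)] else acc2) acc = acc := by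
  induction ns generalizing acc with
  | nil => rfl
  | cons nm ns ih =>
    simp only [List.foldl]
    rw [if_neg (by simp_all), ih _ (by simp_all)]

theorem foldl_names (l : String) (i : Int) (acc : List (String × Int))
    (ns : List String) (hnd : ns.Nodup) :
    ns.foldl (fun acc2 nm => if l == nm then acc2 ++ [(nm, i)] else acc2) acc =
      if ns.contains l then acc ++ [(l, i)] else acc := by
  induction ns generalizing acc with
  | nil => rfl
  | cons nm ns ih =>
    simp only [List.foldl, List.contains_cons]
    by_cases h : l = nm
    · subst h
      rw [if_pos (by simp), foldl_names_not_mem _ _ _ _ (List.nodup_cons.mp hnd).1]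
      simp
    · rw [if_neg (by simp [h]), ih _ hnd.of_cons]
      simp [beq_iff_eq, h]

theorem a_starts (ls : List String) (i : Int) (acc : List (String × Int)) :
    (PySem.List.enumerate ls i).foldl (fun acc p =>
      SECTION_NAMES.foldl (fun acc2 section_name =>
        if p.2 == section_name then acc2 ++ [(section_name, p.1)] else acc2) acc) acc =
      acc ++ specStarts ls i := by
  induction ls generalizing i acc with
  | nil => simp [PySem.List.enumerate_nil, specStarts]
  | cons l ls ih =>
    rw [PySem.List.enumerate_cons, List.foldl_cons, ih]
    rw [foldl_names l i acc SECTION_NAMES (by decide)]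
    simp only [specStarts]
    by_cases h : l ∈ SECTION_NAMES <;> simp [h]

theorem b_loop (ls : List String) (i : Int) (acc : List (String × Int × Int))
    (pend : Option (String × Int)) (n : Int) :
    bFlush n ((PySem.List.enumerate ls i).foldl bStep (acc, pend)) =
      acc ++ aBuildRanges n ((pend.elim [] (fun p => [p])) ++ specStarts ls i) := by
  induction ls generalizing i acc pend with
  | nil =>
    cases pend with
    | none => simp [PySem.List.enumerate_nil, bFlush, specStarts, aBuildRanges]
    | some p => simp [PySem.List.enumerate_nil, bFlush, specStarts, aBuildRanges]
  | cons l ls ih =>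
    rw [PySem.List.enumerate_cons, List.foldl_cons]
    by_cases h : l ∈ SECTION_NAMES
    · cases pend with
      | none =>
        rw [show bStep (acc, none) (i, l) = (acc, some (l, i)) by simp [bStep, h]]
        rw [ih]
        simp [specStarts, h]
      | some p =>
        rw [show bStep (acc, some p) (i, l) = (acc ++ [(p.1, p.2 + 1, i)], some (l, i)) by
          simp [bStep, h]]
        rw [ih]
        simp [specStarts, h, aBuildRanges]
    · rw [show bStep (acc, pend) (i, l) = (acc, pend) by simp [bStep, h]]
      rw [ih]
      simp [specStarts, h]

-- ===== VERDICT (by name: the statement is the Claim_ definition above) =====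
theorem find_section_ranges_py_spec : Claim_equal_find_section_ranges_py := by
  intro lines _
  unfold Spec_find_section_ranges_py find_section_ranges_py find_section_ranges_py_alt
  rw [a_starts lines 0 [], b_loop lines 0 [] none (lines.length : Int)]
  simp
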